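-- pv_equiv track=rewrite | github.com/SA-Guliy/DecisionGuard | scripts/build_ab_failure_registry.py | _derive_failure_meta
-- ===== SOURCE A (Python) =====
-- FAIL_STATUSES = {"MISSING_ASSIGNMENT", "METHODOLOGY_MISMATCH", "INVALID", "INVALID_METHODS"}
--
-- def _derive_failure_meta(status: str, notes: list[str], errors: list[str]) -> dict[str, str]:
--     status_u = str(status or "").upper()
--     notes_l = " | ".join(str(n) for n in notes).lower()
--     errors_l = " | ".join(str(e) for e in errors).lower()
--     pipeline_status = "FAIL" if status_u in FAIL_STATUSES else "PASS"
--     if status_u == "METHODOLOGY_MISMATCH":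
--         if "customer_join" in notes_l:
--             return {
--                 "pipeline_status": pipeline_status,
--                 "error_family": "DATA_JOIN",
--                 "error_code": "DATA_JOIN_CUSTOMER_GRAIN_UNAVAILABLE",
--             }
--         return {"pipeline_status": pipeline_status, "error_family": "METHOD", "error_code": "METHOD_ANALYSIS_UNIT_MISMATCH"}
--     if status_u == "MISSING_ASSIGNMENT":
--         if "missing_experiment_id" in notes_l:
--             return {"pipeline_status": pipeline_status, "error_family": "CONTRACT", "error_code": "CONTRACT_EXPERIMENT_ID_MISSING"}
--         if "customer_join_error:" in notes_l or "customer_join_unavailable_fallback_store" in notes_l: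
--             return {
--                 "pipeline_status": pipeline_status,
--                 "error_family": "DATA_JOIN",
--                 "error_code": "DATA_JOIN_CUSTOMER_GRAIN_UNAVAILABLE",
--             }
--         if "orders_have_experiment_but_assignment_log_empty" in errors_l:
--             return {
--                 "pipeline_status": pipeline_status,
--                 "error_family": "DATA_CONTRACT",
--                 "error_code": "DATA_ASSIGNMENT_LOG_EMPTY_WITH_EXPERIMENT_ROWS",
--             }
--         if "assignment_recovery_failed" in notes_l:
--             return {"pipeline_status": pipeline_status, "error_family": "DATA_ASSIGNMENT", "error_code": "DATA_ASSIGNMENT_RECOVERY_FAILED"}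
--         return {"pipeline_status": pipeline_status, "error_family": "DATA_ASSIGNMENT", "error_code": "DATA_ASSIGNMENT_MISSING"}
--     if status_u == "INVALID_METHODS":
--         return {"pipeline_status": pipeline_status, "error_family": "STATS", "error_code": "STATS_METHOD_INCONSISTENCY"}
--     if status_u == "UNDERPOWERED":
--         return {"pipeline_status": pipeline_status, "error_family": "STATS", "error_code": "STATS_UNDERPOWERED"}
--     if status_u == "INCONCLUSIVE":
--         return {"pipeline_status": pipeline_status, "error_family": "STATS", "error_code": "STATS_INCONCLUSIVE"}
--     if status_u == "HOLD_RISK":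
--         return {"pipeline_status": pipeline_status, "error_family": "RISK", "error_code": "RISK_GUARDRAIL_OR_SRM_WARN"}
--     return {"pipeline_status": pipeline_status, "error_family": "NONE", "error_code": "NONE"}
-- ===== SOURCE B (Python) =====
-- FAIL_STATUSES = {"MISSING_ASSIGNMENT", "METHODOLOGY_MISMATCH", "INVALID", "INVALID_METHODS"}
--
-- _SIMPLE = {
--     "INVALID_METHODS": ("STATS", "STATS_METHOD_INCONSISTENCY"),
--     "UNDERPOWERED": ("STATS", "STATS_UNDERPOWERED"),
--     "INCONCLUSIVE": ("STATS", "STATS_INCONCLUSIVE"),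
--     "HOLD_RISK": ("RISK", "RISK_GUARDRAIL_OR_SRM_WARN"),
-- }
--
--
-- def _contains(sub: str, items: list) -> bool:
--     # Exact w.r.t. searching " | ".join(items).lower(): no needle contains ' ' or '|',
--     # so an occurrence can never span a join boundary; scan elements lazily instead.
--     return any(sub in str(x).lower() for x in items)
--
--
-- def _classify(status_u: str, notes: list, errors: list) -> tuple:
--     if status_u == "METHODOLOGY_MISMATCH":
--         if _contains("customer_join", notes):
--             return ("DATA_JOIN", "DATA_JOIN_CUSTOMER_GRAIN_UNAVAILABLE")
--         return ("METHOD", "METHOD_ANALYSIS_UNIT_MISMATCH")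
--     if status_u == "MISSING_ASSIGNMENT":
--         if _contains("missing_experiment_id", notes):
--             return ("CONTRACT", "CONTRACT_EXPERIMENT_ID_MISSING")
--         if _contains("customer_join_error:", notes) or _contains("customer_join_unavailable_fallback_store", notes):
--             return ("DATA_JOIN", "DATA_JOIN_CUSTOMER_GRAIN_UNAVAILABLE")
--         if _contains("orders_have_experiment_but_assignment_log_empty", errors):
--             return ("DATA_CONTRACT", "DATA_ASSIGNMENT_LOG_EMPTY_WITH_EXPERIMENT_ROWS")
--         if _contains("assignment_recovery_failed", notes):
--             return ("DATA_ASSIGNMENT", "DATA_ASSIGNMENT_RECOVERY_FAILED")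
--         return ("DATA_ASSIGNMENT", "DATA_ASSIGNMENT_MISSING")
--     return _SIMPLE.get(status_u, ("NONE", "NONE"))
--
--
-- def _derive_failure_meta(status: str, notes: list, errors: list) -> dict:
--     status_u = str(status or "").upper()
--     family, code = _classify(status_u, notes, errors)
--     return {
--         "pipeline_status": "FAIL" if status_u in FAIL_STATUSES else "PASS",
--         "error_family": family,
--         "error_code": code,
--     }
-- ===== Notes on version B (the rewrite author's own statement) =====
-- stated objective: faster
-- what changed: B never builds A's joined lowercase haystack strings: it classifies by a short-circuiting per-element scan (any(sub in x.lower() for x in items)) over the raw notes/errors lists, correct because no needle contains ' ' or '|' so a match cannot span a join boundary, with a classifier helper returning the (family, code) pair and simple statuses resolved from a small table.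
import Mathlib
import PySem

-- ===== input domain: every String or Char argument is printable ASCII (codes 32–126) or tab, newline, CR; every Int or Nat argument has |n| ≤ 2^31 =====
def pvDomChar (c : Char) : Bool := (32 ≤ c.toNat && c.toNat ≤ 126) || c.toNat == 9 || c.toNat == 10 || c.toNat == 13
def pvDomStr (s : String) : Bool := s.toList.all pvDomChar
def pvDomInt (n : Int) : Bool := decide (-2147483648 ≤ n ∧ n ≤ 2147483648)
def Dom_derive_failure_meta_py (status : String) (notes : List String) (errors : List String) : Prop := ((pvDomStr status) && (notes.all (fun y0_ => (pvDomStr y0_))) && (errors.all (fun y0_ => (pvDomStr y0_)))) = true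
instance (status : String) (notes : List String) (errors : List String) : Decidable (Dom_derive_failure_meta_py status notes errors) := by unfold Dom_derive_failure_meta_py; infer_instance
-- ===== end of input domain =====

-- B never builds the joined lowercase haystacks: it classifies by scanning the note/error elements one
-- at a time with a short-circuiting per-element substring test (exact because no needle contains ' ' or '|',
-- so a match can never span a join boundary); objective: faster (constant factor, measured).

-- ===== PORT A =====
def pvFailStatuses : PySem.Set String :=
  PySem.Set.ofList ["MISSING_ASSIGNMENT", "METHODOLOGY_MISMATCH", "INVALID", "INVALID_METHODS"]

def derive_failure_meta_py (status : String) (notes : List String) (errors : List String) : List (String × String) :=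
  let status_u := PySem.Str.upper (if status == "" then "" else status)
  let notes_l := PySem.Str.lower (PySem.Str.join " | " notes)
  let errors_l := PySem.Str.lower (PySem.Str.join " | " errors)
  let pipeline_status := if PySem.Set.contains pvFailStatuses status_u then "FAIL" else "PASS"
  if status_u == "METHODOLOGY_MISMATCH" then
    if PySem.Str.isIn "customer_join" notes_l then
      [("pipeline_status", pipeline_status), ("error_family", "DATA_JOIN"), ("error_code", "DATA_JOIN_CUSTOMER_GRAIN_UNAVAILABLE")]
    else
      [("pipeline_status", pipeline_status), ("error_family", "METHOD"), ("error_code", "METHOD_ANALYSIS_UNIT_MISMATCH")]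
  else if status_u == "MISSING_ASSIGNMENT" then
    if PySem.Str.isIn "missing_experiment_id" notes_l then
      [("pipeline_status", pipeline_status), ("error_family", "CONTRACT"), ("error_code", "CONTRACT_EXPERIMENT_ID_MISSING")]
    else if PySem.Str.isIn "customer_join_error:" notes_l || PySem.Str.isIn "customer_join_unavailable_fallback_store" notes_l then
      [("pipeline_status", pipeline_status), ("error_family", "DATA_JOIN"), ("error_code", "DATA_JOIN_CUSTOMER_GRAIN_UNAVAILABLE")]
    else if PySem.Str.isIn "orders_have_experiment_but_assignment_log_empty" errors_l then
      [("pipeline_status", pipeline_status), ("error_family", "DATA_CONTRACT"), ("error_code", "DATA_ASSIGNMENT_LOG_EMPTY_WITH_EXPERIMENT_ROWS")]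
    else if PySem.Str.isIn "assignment_recovery_failed" notes_l then
      [("pipeline_status", pipeline_status), ("error_family", "DATA_ASSIGNMENT"), ("error_code", "DATA_ASSIGNMENT_RECOVERY_FAILED")]
    else
      [("pipeline_status", pipeline_status), ("error_family", "DATA_ASSIGNMENT"), ("error_code", "DATA_ASSIGNMENT_MISSING")]
  else if status_u == "INVALID_METHODS" then
    [("pipeline_status", pipeline_status), ("error_family", "STATS"), ("error_code", "STATS_METHOD_INCONSISTENCY")]
  else if status_u == "UNDERPOWERED" then
    [("pipeline_status", pipeline_status), ("error_family", "STATS"), ("error_code", "STATS_UNDERPOWERED")]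
  else if status_u == "INCONCLUSIVE" then
    [("pipeline_status", pipeline_status), ("error_family", "STATS"), ("error_code", "STATS_INCONCLUSIVE")]
  else if status_u == "HOLD_RISK" then
    [("pipeline_status", pipeline_status), ("error_family", "RISK"), ("error_code", "RISK_GUARDRAIL_OR_SRM_WARN")]
  else
    [("pipeline_status", pipeline_status), ("error_family", "NONE"), ("error_code", "NONE")]

-- ===== PORT B =====
-- any(sub in str(x).lower() for x in items): lazy per-element scan, no join
def pvContains (sub : String) (items : List String) : Bool :=
  items.any (fun x => PySem.Str.isIn sub (PySem.Str.lower x))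

def pvSimpleTable : PySem.Dict String (String × String) :=
  PySem.Dict.mk
    [("INVALID_METHODS", ("STATS", "STATS_METHOD_INCONSISTENCY")),
     ("UNDERPOWERED", ("STATS", "STATS_UNDERPOWERED")),
     ("INCONCLUSIVE", ("STATS", "STATS_INCONCLUSIVE")),
     ("HOLD_RISK", ("RISK", "RISK_GUARDRAIL_OR_SRM_WARN"))]

def pvClassify (status_u : String) (notes : List String) (errors : List String) : String × String :=
  if status_u == "METHODOLOGY_MISMATCH" then
    if pvContains "customer_join" notes then ("DATA_JOIN", "DATA_JOIN_CUSTOMER_GRAIN_UNAVAILABLE")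
    else ("METHOD", "METHOD_ANALYSIS_UNIT_MISMATCH")
  else if status_u == "MISSING_ASSIGNMENT" then
    if pvContains "missing_experiment_id" notes then ("CONTRACT", "CONTRACT_EXPERIMENT_ID_MISSING")
    else if pvContains "customer_join_error:" notes || pvContains "customer_join_unavailable_fallback_store" notes then
      ("DATA_JOIN", "DATA_JOIN_CUSTOMER_GRAIN_UNAVAILABLE")
    else if pvContains "orders_have_experiment_but_assignment_log_empty" errors then
      ("DATA_CONTRACT", "DATA_ASSIGNMENT_LOG_EMPTY_WITH_EXPERIMENT_ROWS")
    else if pvContains "assignment_recovery_failed" notes then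
      ("DATA_ASSIGNMENT", "DATA_ASSIGNMENT_RECOVERY_FAILED")
    else ("DATA_ASSIGNMENT", "DATA_ASSIGNMENT_MISSING")
  else PySem.Dict.getD pvSimpleTable status_u ("NONE", "NONE")

def derive_failure_meta_py_alt (status : String) (notes : List String) (errors : List String) : List (String × String) :=
  let status_u := PySem.Str.upper (if status == "" then "" else status)
  let fc := pvClassify status_u notes errors
  [("pipeline_status", if PySem.Set.contains pvFailStatuses status_u then "FAIL" else "PASS"),
   ("error_family", fc.1), ("error_code", fc.2)]

-- ===== PRECONDITION & SPEC =====
def Spec_derive_failure_meta_py (status : String) (notes : List String) (errors : List String) (out : List (String × String)) : Prop := out = derive_failure_meta_py_alt status notes errors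
instance (status : String) (notes : List String) (errors : List String) (out : List (String × String)) : Decidable (Spec_derive_failure_meta_py status notes errors out) := by unfold Spec_derive_failure_meta_py; infer_instance

-- ===== CLAIM (what is proved, stated in full; the proofs are below) =====
def Claim_equal_derive_failure_meta_py : Prop := ∀ (status : String) (notes : List String) (errors : List String), Dom_derive_failure_meta_py status notes errors → Spec_derive_failure_meta_py status notes errors (derive_failure_meta_py status notes errors)

-- ===== LEMMAS AND PROOFS =====

-- a prefix of a ++ (m ++ rest) whose chars avoid m's chars stays inside a (m ≠ [])
theorem pv_prefix_skip (sub m rest : List Char) (hd : ∀ c ∈ sub, c ∉ m) (hm : m ≠ []) :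
    ∀ a : List Char, sub <+: a ++ (m ++ rest) → sub <+: a := by
  intro a h
  by_cases hl : sub.length ≤ a.length
  · exact List.prefix_of_prefix_length_le h (List.prefix_append a _) hl
  · exfalso
    have ha : a <+: sub :=
      List.prefix_of_prefix_length_le (List.prefix_append a _) h (by omega)
    obtain ⟨r, hr⟩ := ha
    subst hr
    have hr2 : r <+: m ++ rest := (List.prefix_append_right_inj a).mp h
    cases r with
    | nil => simp at hl
    | cons c r' =>
      cases m with
      | nil => exact hm rfl
      | cons cm m' =>
        have := (List.cons_prefix_cons).mp hr2
        exact hd c (by simp) (by simp [this.1])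

-- an occurrence of sub (nonempty, avoiding m's chars) in m ++ b lies in b
theorem pv_mid (sub : List Char) (hsub : sub ≠ []) :
    ∀ m b : List Char, (∀ c ∈ sub, c ∉ m) → (sub <:+: m ++ b ↔ sub <:+: b) := by
  intro m
  induction m with
  | nil => intro b _; simp
  | cons c m' ih =>
    intro b hd
    rw [List.cons_append, List.infix_cons_iff]
    constructor
    · rintro (hp | hi)
      · exfalso
        cases sub with
        | nil => exact hsub rfl
        | cons s0 s' =>
          have := (List.cons_prefix_cons).mp hp
          exact hd s0 (by simp) (by simp [this.1])
      · exact (ih b (fun x hx => fun hm => hd x hx (by simp [hm]))).mp hi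
    · intro h
      exact Or.inr ((ih b (fun x hx hm => hd x hx (by simp [hm]))).mpr h)

-- the boundary-crossing argument: sub occurs in a ++ m ++ b iff in a or in b
theorem pv_split (sub m : List Char) (hsub : sub ≠ []) (hm : m ≠ [])
    (hd : ∀ c ∈ sub, c ∉ m) :
    ∀ a b : List Char, (sub <:+: a ++ (m ++ b)) ↔ (sub <:+: a ∨ sub <:+: b) := by
  intro a
  induction a with
  | nil =>
    intro b
    simp only [List.nil_append]
    rw [pv_mid sub hsub m b hd]
    simp [List.infix_nil, hsub]
  | cons x a' ih =>
    intro b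
    rw [List.cons_append, List.infix_cons_iff]
    constructor
    · rintro (hp | hi)
      · have : sub <+: (x :: a') ++ (m ++ b) := by simpa using hp
        exact Or.inl (pv_prefix_skip sub m b hd hm (x :: a') this).isInfix
      · rcases (ih b).mp hi with h | h
        · exact Or.inl (List.infix_cons_iff.mpr (Or.inr h))
        · exact Or.inr h
    · rintro (h | h)
      · rcases List.infix_cons_iff.mp h with hp | hi
        · exact Or.inl (by simpa using hp.trans (List.prefix_append (x :: a') (m ++ b)))
        · exact Or.inr ((ih b).mpr (Or.inl hi))
      · exact Or.inr ((ih b).mpr (Or.inr h))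

-- Bool form of pv_split for Chars.isIn
theorem pv_isIn_split (sub m : List Char) (hsub : sub ≠ []) (hm : m ≠ [])
    (hd : ∀ c ∈ sub, c ∉ m) (a b : List Char) :
    PySem.Chars.isIn sub (a ++ (m ++ b)) = (PySem.Chars.isIn sub a || PySem.Chars.isIn sub b) := by
  have h := pv_split sub m hsub hm hd a b
  simp only [← PySem.Chars.isIn_iff_infix] at h
  cases ha : PySem.Chars.isIn sub a <;> cases hb : PySem.Chars.isIn sub b <;>
    simp [ha, hb] at h ⊢ <;> simp [h]

-- searching the lowered " | "-join = searching each lowered element (needle avoids ' ' and '|')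
theorem pv_join_scan (sub : List Char) (hsub : sub ≠ [])
    (hd : ∀ c ∈ sub, c ≠ ' ' ∧ c ≠ '|') :
    ∀ xs : List (List Char),
      PySem.Chars.isIn sub (PySem.Chars.lower (PySem.Chars.join [' ', '|', ' '] xs)) =
        xs.any (fun x => PySem.Chars.isIn sub (PySem.Chars.lower x)) := by
  have hd' : ∀ c ∈ sub, c ∉ ([' ', '|', ' '] : List Char) := by
    intro c hc hmem
    rcases hd c hc with ⟨h1, h2⟩
    simp at hmem
    tauto
  intro xs
  induction xs with
  | nil =>
    simp [PySem.Chars.join, List.intercalate, PySem.Chars.lower,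
      PySem.Chars.isIn_eq_false_iff, List.infix_nil, hsub]
  | cons x xs ih =>
    cases xs with
    | nil => simp [PySem.Chars.join, List.intercalate, List.intersperse]
    | cons y r =>
      have hstep : PySem.Chars.join [' ', '|', ' '] (x :: y :: r) =
          x ++ ([' ', '|', ' '] ++ PySem.Chars.join [' ', '|', ' '] (y :: r)) := by
        simp [PySem.Chars.join, List.intercalate, List.intersperse]
      rw [hstep]
      have hlm : PySem.Chars.lower (x ++ ([' ', '|', ' '] ++ PySem.Chars.join [' ', '|', ' '] (y :: r))) =
          PySem.Chars.lower x ++ ([' ', '|', ' '] ++ PySem.Chars.lower (PySem.Chars.join [' ', '|', ' '] (y :: r))) := by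
        simp only [PySem.Chars.lower, List.map_append]
        rw [show List.map PySem.Chars.lowerChar [' ', '|', ' '] = [' ', '|', ' '] from by decide]
      rw [hlm, pv_isIn_split sub _ hsub (by simp) hd', ih]
      simp

-- string-level bridge: A's haystack test equals B's per-element scan
theorem pv_bridge (sub : String) (hsub : sub.toList ≠ [])
    (hd : (sub.toList.all (fun c => !(c == ' ') && !(c == '|'))) = true) (xs : List String) :
    PySem.Str.isIn sub (PySem.Str.lower (PySem.Str.join " | " xs)) = pvContains sub xs := by
  have hd' : ∀ c ∈ sub.toList, c ≠ ' ' ∧ c ≠ '|' := by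
    intro c hc
    have := List.all_eq_true.mp hd c hc
    simp at this; exact this
  simp only [pvContains, PySem.Str.isIn, PySem.Str.toList_lower, PySem.Str.toList_join]
  have : (" | " : String).toList = [' ', '|', ' '] := rfl
  rw [this, pv_join_scan sub.toList hsub hd' (xs.map String.toList), List.any_map]
  rfl

-- ===== VERDICT (by name: the statement is the Claim_ definition above) =====
set_option maxHeartbeats 1000000 in
set_option maxRecDepth 4000 in
theorem derive_failure_meta_py_spec : Claim_equal_derive_failure_meta_py := by
  intro status notes errors _
  simp only [Spec_derive_failure_meta_py, derive_failure_meta_py, derive_failure_meta_py_alt,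
    pvClassify, pvSimpleTable]
  rw [pv_bridge "customer_join" (by decide) (by decide) notes,
      pv_bridge "missing_experiment_id" (by decide) (by decide) notes,
      pv_bridge "customer_join_error:" (by decide) (by decide) notes,
      pv_bridge "customer_join_unavailable_fallback_store" (by decide) (by decide) notes,
      pv_bridge "orders_have_experiment_but_assignment_log_empty" (by decide) (by decide) errors,
      pv_bridge "assignment_recovery_failed" (by decide) (by decide) notes]
  set u := PySem.Str.upper (if status == "" then "" else status) with hu
  by_cases h1 : u = "METHODOLOGY_MISMATCH"
  · by_cases c1 : pvContains "customer_join" notes <;> simp [h1, c1]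
  · by_cases h2 : u = "MISSING_ASSIGNMENT"
    · by_cases m1 : pvContains "missing_experiment_id" notes <;>
      by_cases j1 : pvContains "customer_join_error:" notes <;>
      by_cases j2 : pvContains "customer_join_unavailable_fallback_store" notes <;>
      by_cases e1 : pvContains "orders_have_experiment_but_assignment_log_empty" errors <;>
      by_cases r1 : pvContains "assignment_recovery_failed" notes <;>
        simp [h2, m1, j1, j2, e1, r1]
    · by_cases h3 : u = "INVALID_METHODS"
      · simp [h3, PySem.Dict.getD, PySem.Dict.get?, List.find?]
      · by_cases h4 : u = "UNDERPOWERED"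
        · simp [h4, PySem.Dict.getD, PySem.Dict.get?, List.find?]
        · by_cases h5 : u = "INCONCLUSIVE"
          · simp [h5, PySem.Dict.getD, PySem.Dict.get?, List.find?]
          · by_cases h6 : u = "HOLD_RISK"
            · simp [h6, PySem.Dict.getD, PySem.Dict.get?, List.find?]
            · have a1 : (u == "METHODOLOGY_MISMATCH") = false := beq_eq_false_iff_ne.mpr h1
              have a2 : (u == "MISSING_ASSIGNMENT") = false := beq_eq_false_iff_ne.mpr h2
              have a3 : (u == "INVALID_METHODS") = false := beq_eq_false_iff_ne.mpr h3
              have a4 : (u == "UNDERPOWERED") = false := beq_eq_false_iff_ne.mpr h4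
              have a5 : (u == "INCONCLUSIVE") = false := beq_eq_false_iff_ne.mpr h5
              have a6 : (u == "HOLD_RISK") = false := beq_eq_false_iff_ne.mpr h6
              have b3 : ("INVALID_METHODS" == u) = false := beq_eq_false_iff_ne.mpr (fun e => h3 e.symm)
              have b4 : ("UNDERPOWERED" == u) = false := beq_eq_false_iff_ne.mpr (fun e => h4 e.symm)
              have b5 : ("INCONCLUSIVE" == u) = false := beq_eq_false_iff_ne.mpr (fun e => h5 e.symm)
              have b6 : ("HOLD_RISK" == u) = false := beq_eq_false_iff_ne.mpr (fun e => h6 e.symm)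
              simp [a1, a2, a3, a4, a5, a6, b3, b4, b5, b6, PySem.Dict.getD, PySem.Dict.get?, List.find?]
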